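-- pv_equiv track=rewrite | github.com/esoba/aiperf | src/aiperf/dataset/loader/api_capture_trace.py | _extract_last_session
-- ===== SOURCE A (Python) =====
-- def _extract_last_session(request_entries: list[dict]) -> list[dict]:
--     """Extract request entries from the last session.
--
--     Sessions are separated by call_index resets (when call_index decreases
--     or resets to 0).
--     """
--     if not request_entries:
--         return []
--
--     session_start = 0
--     prev_ci = -1
--     for i, entry in enumerate(request_entries):
--         ci = entry.get("call_index", 0)
--         if ci <= prev_ci:
--             session_start = i
--         prev_ci = ci
--
--     return request_entries[session_start:]
-- ===== SOURCE B (Python) =====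
-- def _extract_last_session(request_entries: list[dict]) -> list[dict]:
--     """Extract request entries from the last session (reverse scan, early exit)."""
--     session_start = 0
--     for i in range(len(request_entries) - 1, 0, -1):
--         if request_entries[i].get("call_index", 0) <= request_entries[i - 1].get("call_index", 0):
--             session_start = i
--             break
--     return request_entries[session_start:]
-- ===== Notes on version B (the rewrite author's own statement) =====
-- stated objective: alternative
-- what changed: Replaces A's full forward sweep with running prev_ci/session_start state by a reverse scan from the end that stops at the first (i.e. last) call_index reset and returns immediately.
import Mathlib
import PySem

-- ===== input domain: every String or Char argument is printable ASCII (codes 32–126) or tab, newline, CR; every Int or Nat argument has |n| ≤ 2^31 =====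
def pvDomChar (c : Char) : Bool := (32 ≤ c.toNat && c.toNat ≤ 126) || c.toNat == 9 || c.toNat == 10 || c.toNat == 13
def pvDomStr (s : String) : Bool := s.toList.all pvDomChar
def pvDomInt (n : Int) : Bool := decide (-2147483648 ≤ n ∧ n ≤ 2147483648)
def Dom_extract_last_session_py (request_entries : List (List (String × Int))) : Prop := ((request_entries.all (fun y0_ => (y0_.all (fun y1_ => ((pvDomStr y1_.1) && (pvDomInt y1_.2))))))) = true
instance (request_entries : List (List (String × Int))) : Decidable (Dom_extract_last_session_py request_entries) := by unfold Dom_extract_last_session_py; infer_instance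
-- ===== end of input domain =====

-- B replaces A's full forward sweep (running prev_ci / session_start state) by a reverse scan
-- that stops at the first reset found from the end; objective: alternative (early exit).

-- ===== PORT A =====
-- entry.get("call_index", 0): first-match association-list lookup with default 0
def pvGetCI (e : List (String × Int)) : Int := (e.lookup "call_index").getD 0

def extract_last_session_py (request_entries : List (List (String × Int))) : List (List (String × Int)) :=
  if request_entries = [] then []
  else
    let r := (PySem.List.enumerate request_entries).foldl
      (fun (s : Int × Int) (p : Int × List (String × Int)) =>
        let ci := pvGetCI p.2
        (if ci ≤ s.2 then p.1 else s.1, ci)) (0, -1)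
    PySem.List.slice request_entries (some r.1) none

-- ===== PORT B =====
-- the reverse loop 'for i in range(len-1, 0, -1): … break' as downward recursion on i
def pvAltScan (xs : List (List (String × Int))) : Nat → Nat
  | 0 => 0
  | i + 1 =>
    if pvGetCI (xs.getD (i + 1) []) ≤ pvGetCI (xs.getD i []) then i + 1
    else pvAltScan xs i

def extract_last_session_py_alt (request_entries : List (List (String × Int))) : List (List (String × Int)) :=
  PySem.List.slice request_entries (some ((pvAltScan request_entries (request_entries.length - 1) : Nat) : Int)) none

-- ===== PRECONDITION & SPEC =====
def Spec_extract_last_session_py (request_entries : List (List (String × Int))) (out : List (List (String × Int))) : Prop := out = extract_last_session_py_alt request_entries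
instance (request_entries : List (List (String × Int))) (out : List (List (String × Int))) : Decidable (Spec_extract_last_session_py request_entries out) := by unfold Spec_extract_last_session_py; infer_instance

-- ===== CLAIM (what is proved, stated in full; the proofs are below) =====
def Claim_equal_extract_last_session_py : Prop := ∀ (request_entries : List (List (String × Int))), Dom_extract_last_session_py request_entries → Spec_extract_last_session_py request_entries (extract_last_session_py request_entries)

-- ===== LEMMAS AND PROOFS =====

def pvStep (s : Int × Int) (p : Int × List (String × Int)) : Int × Int :=
  (if pvGetCI p.2 ≤ s.2 then p.1 else s.1, pvGetCI p.2)

lemma pvAltScan_congr (ys zs : List (List (String × Int))) (n : Nat)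
    (h : ∀ j, j ≤ n → ys.getD j [] = zs.getD j []) : pvAltScan ys n = pvAltScan zs n := by
  induction n with
  | zero => rfl
  | succ i ih =>
    simp only [pvAltScan, h (i+1) le_rfl, h i (by omega)]
    rw [ih (fun j hj => h j (by omega))]

lemma pvKey (xs : List (List (String × Int))) (x : List (String × Int)) :
    (PySem.List.enumerate (xs ++ [x]) 0).foldl pvStep (0, -1)
      = (((pvAltScan (xs ++ [x]) xs.length : Nat) : Int), pvGetCI x) := by
  induction xs using List.reverseRecOn generalizing x with
  | nil =>
    simp [PySem.List.enumerate_cons, PySem.List.enumerate_nil, pvStep, pvAltScan]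
  | append_singleton ys y ih =>
    have hlen : (ys ++ [y]).length = ys.length + 1 := by simp
    rw [PySem.List.enumerate_append, List.foldl_append, ih y]
    have h2 : PySem.List.enumerate [x] ((0 : Int) + ((ys ++ [y]).length : Int))
        = [(((ys ++ [y]).length : Int), x)] := by
      simp [PySem.List.enumerate_cons, PySem.List.enumerate_nil]
    rw [h2]
    have hgx : (ys ++ [y] ++ [x]).getD (ys.length + 1) [] = x := by
      rw [List.append_assoc]
      rw [List.getD_eq_getElem?_getD, List.getElem?_append_right (by simp)]
      simp
    have hgy : (ys ++ [y] ++ [x]).getD ys.length [] = y := by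
      rw [List.getD_eq_getElem?_getD, List.getElem?_append_left (by simp)]
      simp
    have hsc : pvAltScan (ys ++ [y] ++ [x]) ys.length = pvAltScan (ys ++ [y]) ys.length := by
      apply pvAltScan_congr
      intro j hj
      rw [List.getD_eq_getElem?_getD, List.getD_eq_getElem?_getD,
        List.getElem?_append_left (by simp; omega)]
    rw [hlen]
    simp only [pvAltScan, hgx, hgy, hsc]
    simp only [List.foldl_cons, List.foldl_nil, pvStep]
    split <;> rfl

-- ===== VERDICT (by name: the statement is the Claim_ definition above) =====
theorem extract_last_session_py_spec : Claim_equal_extract_last_session_py := by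
  intro xs _
  unfold Spec_extract_last_session_py extract_last_session_py extract_last_session_py_alt
  rcases List.eq_nil_or_concat xs with rfl | ⟨ys, x, rfl⟩
  · simp [pvAltScan]
  · simp only [List.concat_eq_append]
    have hne : ys ++ [x] ≠ [] := by simp
    rw [if_neg hne]
    have : (PySem.List.enumerate (ys ++ [x])).foldl
        (fun (s : Int × Int) (p : Int × List (String × Int)) =>
          (if pvGetCI p.2 ≤ s.2 then p.1 else s.1, pvGetCI p.2)) (0, -1)
        = (((pvAltScan (ys ++ [x]) ys.length : Nat) : Int), pvGetCI x) := pvKey ys x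
    rw [show (fun (s : Int × Int) (p : Int × List (String × Int)) =>
          (if pvGetCI p.2 ≤ s.2 then p.1 else s.1, pvGetCI p.2)) = pvStep from rfl] at this ⊢
    rw [this]
    have hl : (ys ++ [x]).length - 1 = ys.length := by simp
    rw [hl]
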